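-- pv_equiv track=rewrite | github.com/schlpbch/open-meteo-mcp | src/open_meteo_mcp/helpers.py | get_seasonal_advice
-- ===== SOURCE A (Python) =====
-- def get_seasonal_advice(month: int) -> str:
--     """
--     Get seasonal advice for outdoor activities.
--
--     Args:
--         month: Month number (1-12)
--
--     Returns:
--         Seasonal advice string
--     """
--     seasons = {
--         (
--             12,
--             1,
--             2,
--         ): "Winter: Ideal for skiing and snow sports. Dress warmly and check avalanche warnings.",
--         (
--             3,
--             4,
--             5,
--         ): "Spring: Variable conditions. Snow melting at lower elevations. Good for hiking as weather improves.",
--         (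
--             6,
--             7,
--             8,
--         ): "Summer: Best for hiking, climbing, and outdoor activities. Watch for afternoon thunderstorms in mountains.",
--         (
--             9,
--             10,
--             11,
--         ): "Autumn: Beautiful colors, but weather becoming unpredictable. Early snow possible at high elevations.",
--     }
--
--     for months, advice in seasons.items():
--         if month in months:
--             return advice
--
--     return "Check current conditions before outdoor activities."
-- ===== SOURCE B (Python) =====
-- WINTER = "Winter: Ideal for skiing and snow sports. Dress warmly and check avalanche warnings."
-- SPRING = "Spring: Variable conditions. Snow melting at lower elevations. Good for hiking as weather improves."
-- SUMMER = "Summer: Best for hiking, climbing, and outdoor activities. Watch for afternoon thunderstorms in mountains."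
-- AUTUMN = "Autumn: Beautiful colors, but weather becoming unpredictable. Early snow possible at high elevations."
-- FALLBACK = "Check current conditions before outdoor activities."
--
-- _ADVICE = [WINTER, SPRING, SUMMER, AUTUMN]
--
-- def get_seasonal_advice(month: int) -> str:
--     if 1 <= month <= 12:
--         return _ADVICE[(month % 12) // 3]
--     return FALLBACK
-- ===== Notes on version B (the rewrite author's own statement) =====
-- stated objective: simpler
-- what changed: Replaces the dict-of-month-tuples scan with a range guard plus a closed-form season index (month % 12) // 3 into a 4-element list.
import Mathlib
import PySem

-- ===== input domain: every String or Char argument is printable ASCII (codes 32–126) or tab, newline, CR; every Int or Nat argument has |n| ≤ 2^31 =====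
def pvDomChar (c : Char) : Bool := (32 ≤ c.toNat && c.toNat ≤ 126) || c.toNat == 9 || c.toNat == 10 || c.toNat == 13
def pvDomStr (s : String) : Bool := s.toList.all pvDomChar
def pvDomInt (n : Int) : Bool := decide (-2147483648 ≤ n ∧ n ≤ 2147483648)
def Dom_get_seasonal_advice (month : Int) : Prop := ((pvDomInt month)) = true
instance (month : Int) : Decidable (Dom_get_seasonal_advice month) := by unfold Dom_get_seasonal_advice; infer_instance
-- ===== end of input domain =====

-- B replaces A's scan over a dict of month-tuples by a 1..12 guard plus the
-- closed-form season index (month % 12) // 3 into a 4-element list (objective: simpler).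

-- ===== PORT A =====
-- A iterates over the dict's items in insertion order and returns the first
-- advice whose month-tuple contains `month`; transliterated as the same
-- ordered chain of membership tests.
def get_seasonal_advice (month : Int) : String :=
  if ([12, 1, 2] : List Int).contains month then
    "Winter: Ideal for skiing and snow sports. Dress warmly and check avalanche warnings."
  else if ([3, 4, 5] : List Int).contains month then
    "Spring: Variable conditions. Snow melting at lower elevations. Good for hiking as weather improves."
  else if ([6, 7, 8] : List Int).contains month then
    "Summer: Best for hiking, climbing, and outdoor activities. Watch for afternoon thunderstorms in mountains."
  else if ([9, 10, 11] : List Int).contains month then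
    "Autumn: Beautiful colors, but weather becoming unpredictable. Early snow possible at high elevations."
  else
    "Check current conditions before outdoor activities."

-- ===== PORT B =====
def pvAdviceList : List String :=
  [ "Winter: Ideal for skiing and snow sports. Dress warmly and check avalanche warnings."
  , "Spring: Variable conditions. Snow melting at lower elevations. Good for hiking as weather improves."
  , "Summer: Best for hiking, climbing, and outdoor activities. Watch for afternoon thunderstorms in mountains."
  , "Autumn: Beautiful colors, but weather becoming unpredictable. Early snow possible at high elevations." ]

def get_seasonal_advice_alt (month : Int) : String :=
  if 1 ≤ month ∧ month ≤ 12 then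
    -- _ADVICE[(month % 12) // 3]; the index is provably in 0..3 inside the guard,
    -- so the `none` branch of pyGet? is unreachable
    (PySem.List.pyGet? pvAdviceList (PySem.Int.floordiv (PySem.Int.mod month 12) 3)).getD ""
  else
    "Check current conditions before outdoor activities."

-- ===== PRECONDITION & SPEC =====
def Spec_get_seasonal_advice (month : Int) (out : String) : Prop := out = get_seasonal_advice_alt month
instance (month : Int) (out : String) : Decidable (Spec_get_seasonal_advice month out) := by unfold Spec_get_seasonal_advice; infer_instance

-- ===== CLAIM (what is proved, stated in full; the proofs are below) =====
def Claim_equal_get_seasonal_advice : Prop := ∀ (month : Int), Dom_get_seasonal_advice month → Spec_get_seasonal_advice month (get_seasonal_advice month)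

-- ===== LEMMAS AND PROOFS =====

theorem pv_agree (month : Int) : get_seasonal_advice month = get_seasonal_advice_alt month := by
  by_cases h : 1 ≤ month ∧ month ≤ 12
  · obtain ⟨h1, h2⟩ := h
    interval_cases month <;>
      simp [get_seasonal_advice, get_seasonal_advice_alt, pvAdviceList,
        PySem.Int.mod, PySem.Int.floordiv, PySem.List.pyGet?, PySem.List.pyIdx?]
  · have h1 : month ≠ 12 ∧ month ≠ 1 ∧ month ≠ 2 := by omega
    have h2 : month ≠ 3 ∧ month ≠ 4 ∧ month ≠ 5 := by omega
    have h3 : month ≠ 6 ∧ month ≠ 7 ∧ month ≠ 8 := by omega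
    have h4 : month ≠ 9 ∧ month ≠ 10 ∧ month ≠ 11 := by omega
    simp [get_seasonal_advice, get_seasonal_advice_alt, h,
      h1.1, h1.2.1, h1.2.2, h2.1, h2.2.1, h2.2.2, h3.1, h3.2.1, h3.2.2, h4.1, h4.2.1, h4.2.2]

-- ===== VERDICT (by name: the statement is the Claim_ definition above) =====
theorem get_seasonal_advice_spec : Claim_equal_get_seasonal_advice := by
  intro month _
  exact pv_agree month
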